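-- pv_equiv track=rewrite | github.com/DrAK0001/IZBench | izbench.py | _cpu_int_worker
-- ===== SOURCE A (Python) =====
-- def _cpu_int_worker(ops: int):
--     acc = 0
--     a = 1664525
--     c = 1013904223
--     mask = 0xFFFFFFFF
--     for _ in range(ops):
--         acc = (acc * a + c) & mask
--     return acc
-- ===== SOURCE B (Python) =====
-- def _cpu_int_worker(ops: int):
--     # acc_n = c * (1 + a + ... + a^(n-1)) mod 2^32; computed by fast doubling in O(log ops)
--     if ops <= 0:
--         return 0
--     M = 1 << 32
--     a = 1664525
--     c = 1013904223
--
--     def power_sum(n):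
--         # returns (a**n % M, (1 + a + ... + a**(n-1)) % M)
--         if n == 0:
--             return (1, 0)
--         A, S = power_sum(n // 2)
--         A2 = A * A % M
--         S2 = S * (A + 1) % M
--         if n % 2 == 1:
--             return (A2 * a % M, (S2 * a + 1) % M)
--         return (A2, S2)
--
--     return c * power_sum(ops)[1] % M
-- ===== Notes on version B (the rewrite author's own statement) =====
-- stated objective: faster
-- what changed: Replaced the ops-step LCG loop by the closed form acc = c*(1+a+...+a^(ops-1)) mod 2^32, with the geometric sum computed by fast doubling on the exponent.
import Mathlib
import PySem

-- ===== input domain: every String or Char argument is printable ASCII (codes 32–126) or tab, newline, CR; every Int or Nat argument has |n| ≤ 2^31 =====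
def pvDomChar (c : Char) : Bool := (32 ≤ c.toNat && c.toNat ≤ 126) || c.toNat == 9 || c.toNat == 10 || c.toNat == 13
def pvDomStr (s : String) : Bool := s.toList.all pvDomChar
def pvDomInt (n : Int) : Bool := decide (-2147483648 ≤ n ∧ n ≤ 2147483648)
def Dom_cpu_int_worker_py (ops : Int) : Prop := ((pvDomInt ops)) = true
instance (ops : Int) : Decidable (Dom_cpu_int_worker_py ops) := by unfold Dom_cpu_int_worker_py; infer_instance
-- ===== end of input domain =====

-- B replaces A's ops-step LCG loop by the closed form acc = c*(1+a+...+a^(ops-1)) mod 2^32,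
-- computing the geometric sum by fast doubling on the exponent (objective: faster, O(log ops) vs O(ops)).


-- ===== PORT A =====
-- literal transliteration of A: acc = 0; for _ in range(ops): acc = (acc*1664525 + 1013904223) & 0xFFFFFFFF
def cpu_int_worker_py (ops : Int) : Int :=
  (PySem.List.pyRange 0 ops 1).foldl
    (fun acc _ => PySem.Int.band (acc * 1664525 + 1013904223) 4294967295) 0

-- ===== PORT B =====
-- B-side helper: power_sum n = (1664525^n % 2^32, (1 + 1664525 + ... + 1664525^(n-1)) % 2^32), fast doubling
def pvPowSum (n : Nat) : Int × Int :=
  if h : n = 0 then (1, 0)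
  else
    let p := pvPowSum (n / 2)
    let A2 := p.1 * p.1 % 4294967296
    let S2 := p.2 * (p.1 + 1) % 4294967296
    if n % 2 = 1 then (A2 * 1664525 % 4294967296, (S2 * 1664525 + 1) % 4294967296)
    else (A2, S2)
termination_by n
decreasing_by exact Nat.div_lt_self (Nat.pos_of_ne_zero h) (by norm_num)

def cpu_int_worker_py_alt (ops : Int) : Int :=
  if ops ≤ 0 then 0
  else 1013904223 * (pvPowSum ops.toNat).2 % 4294967296

-- ===== PRECONDITION & SPEC =====
def Spec_cpu_int_worker_py (ops : Int) (out : Int) : Prop := out = cpu_int_worker_py_alt ops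
instance (ops : Int) (out : Int) : Decidable (Spec_cpu_int_worker_py ops out) := by unfold Spec_cpu_int_worker_py; infer_instance

-- ===== CLAIM (what is proved, stated in full; the proofs are below) =====
def Claim_equal_cpu_int_worker_py : Prop := ∀ (ops : Int), Dom_cpu_int_worker_py ops → Spec_cpu_int_worker_py ops (cpu_int_worker_py ops)

-- ===== LEMMAS AND PROOFS =====

-- the state of A's loop after n iterations
def pvG : Nat → Int
  | 0 => 0
  | n + 1 => PySem.Int.band (pvG n * 1664525 + 1013904223) 4294967295

-- the exact (un-reduced) geometric sum 1 + a + ... + a^(n-1) for a = 1664525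
def pvT : Nat → Int
  | 0 => 0
  | n + 1 => 1664525 * pvT n + 1

theorem pvFoldl_ignore (f : Int → Int) (l : List Int) (x : Int) :
    l.foldl (fun acc _ => f acc) x = f^[l.length] x := by
  induction l generalizing x with
  | nil => rfl
  | cons h t ih => simp [List.foldl, ih, Function.iterate_succ_apply]

theorem pvG_iter (n : Nat) :
    pvG n = (fun acc => PySem.Int.band (acc * 1664525 + 1013904223) 4294967295)^[n] 0 := by
  induction n with
  | zero => rfl
  | succ n ih => simp [pvG, Function.iterate_succ_apply', ih]

theorem pvA_eq_pvG (ops : Int) : cpu_int_worker_py ops = pvG ops.toNat := by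
  unfold cpu_int_worker_py
  rw [pvFoldl_ignore, PySem.List.length_pyRange_one, sub_zero, pvG_iter]

theorem pvBand_mask (x : Int) (hx : 0 ≤ x) :
    PySem.Int.band x 4294967295 = x % 4294967296 := by
  rw [PySem.Int.band_of_nonneg hx (by norm_num)]
  have h2 : Int.toNat 4294967295 = 4294967295 := rfl
  have h := Nat.and_two_pow_sub_one_eq_mod x.toNat 32
  norm_num at h
  rw [h2, h]
  omega

theorem pvMul₂ (x y M : Int) : x * (y % M) % M = x * y % M := by
  rw [Int.mul_emod, Int.emod_emod_of_dvd y dvd_rfl, ← Int.mul_emod]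

theorem pvModCast (x M : Int) : (x % M) ≡ x [ZMOD M] :=
  Int.emod_emod_of_dvd x dvd_rfl

theorem pvG_closed (n : Nat) : pvG n = 1013904223 * pvT n % 4294967296 := by
  induction n with
  | zero => simp [pvG, pvT]
  | succ n ih =>
    show PySem.Int.band (pvG n * 1664525 + 1013904223) 4294967295 = _
    rw [ih, pvBand_mask _ (by omega)]
    have e : (1013904223 * pvT n % 4294967296 * 1664525 + 1013904223)
        ≡ 1013904223 * pvT n * 1664525 + 1013904223 [ZMOD 4294967296] :=
      ((pvModCast (1013904223 * pvT n) 4294967296).mul_right 1664525).add_right 1013904223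
    have h2 : 1013904223 * pvT n * 1664525 + 1013904223 = 1013904223 * pvT (n + 1) := by
      simp [pvT]; ring
    rw [← h2]
    exact e

theorem pvT_add (m n : Nat) : pvT (m + n) = pvT n + 1664525 ^ n * pvT m := by
  induction n with
  | zero => simp [pvT]
  | succ n ih =>
    show 1664525 * pvT (m + n) + 1 = _
    rw [ih]
    show _ = (1664525 * pvT n + 1) + 1664525 ^ (n + 1) * pvT m
    ring

theorem pvPowSum_spec (n : Nat) :
    pvPowSum n = (1664525 ^ n % 4294967296, pvT n % 4294967296) := by
  induction n using Nat.strong_induction_on with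
  | _ n ih =>
    rw [pvPowSum]
    by_cases h : n = 0
    · simp [h, pvT]
    · simp only [h, dite_false]
      rw [ih (n / 2) (Nat.div_lt_self (Nat.pos_of_ne_zero h) (by norm_num))]
      generalize hk : n / 2 = k
      have eA : (1664525 ^ k % 4294967296 * (1664525 ^ k % 4294967296) % 4294967296)
          ≡ 1664525 ^ k * 1664525 ^ k [ZMOD 4294967296] :=
        (pvModCast _ 4294967296).trans
          ((pvModCast (1664525 ^ k) 4294967296).mul (pvModCast (1664525 ^ k) 4294967296))
      have eS : (pvT k % 4294967296 * (1664525 ^ k % 4294967296 + 1) % 4294967296)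
          ≡ pvT k * (1664525 ^ k + 1) [ZMOD 4294967296] :=
        (pvModCast _ 4294967296).trans
          ((pvModCast (pvT k) 4294967296).mul
            ((pvModCast (1664525 ^ k) 4294967296).add_right 1))
      by_cases hp : n % 2 = 1
      · have hn : n = k + k + 1 := by omega
        simp only [hp, if_true, Prod.mk.injEq]
        constructor
        · have h2 : (1664525 : Int) ^ k * 1664525 ^ k * 1664525 = 1664525 ^ n := by
            rw [hn]; ring
          rw [← h2]
          exact eA.mul_right 1664525
        · have h2 : pvT k * (1664525 ^ k + 1) * 1664525 + 1 = pvT n := by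
            rw [hn]
            show _ = 1664525 * pvT (k + k) + 1
            rw [pvT_add]; ring
          rw [← h2]
          exact (eS.mul_right 1664525).add_right 1
      · have hn : n = k + k := by omega
        simp only [hp, if_false, Prod.mk.injEq]
        constructor
        · have h2 : (1664525 : Int) ^ k * 1664525 ^ k = 1664525 ^ n := by
            rw [hn]; ring
          rw [← h2]
          exact (Int.emod_emod_of_dvd _ dvd_rfl).symm.trans eA
        · have h2 : pvT k * (1664525 ^ k + 1) = pvT n := by
            rw [hn, pvT_add]; ring
          rw [← h2]
          exact (Int.emod_emod_of_dvd _ dvd_rfl).symm.trans eS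

-- ===== VERDICT (by name: the statement is the Claim_ definition above) =====
theorem cpu_int_worker_py_spec : Claim_equal_cpu_int_worker_py := by
  intro ops _
  show cpu_int_worker_py ops = cpu_int_worker_py_alt ops
  unfold cpu_int_worker_py_alt
  by_cases h : ops ≤ 0
  · simp only [h, if_true]
    unfold cpu_int_worker_py
    rw [PySem.List.pyRange_one_eq_nil h]
    rfl
  · simp only [h, if_false]
    rw [pvA_eq_pvG, pvG_closed, pvPowSum_spec, pvMul₂]
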